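-- pv_equiv track=rewrite | github.com/slidracoon72/leetcode | Solutions/MinOperationsToMakeArrayValuesEqualK.py | minOperations1
-- ===== SOURCE A (Python) =====
-- from typing import List
--
-- def minOperations1(nums: List[int], k: int) -> int:
--     st = set()
--     for x in nums:
--         if x < k:
--             return -1
--         elif x > k:
--             st.add(x)
--     return len(st)
-- ===== SOURCE B (Python) =====
-- from typing import List
--
-- def minOperations1(nums: List[int], k: int) -> int:
--     s = sorted(nums)
--     if s and s[0] < k:
--         return -1
--     count = 0
--     prev = None
--     for x in s:
--         if x > k and x != prev:
--             count += 1
--         prev = x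
--     return count
-- ===== Notes on version B (the rewrite author's own statement) =====
-- stated objective: alternative
-- what changed: B sorts the list first, rejects via the sorted minimum (s[0] < k), and counts distinct values above k by an adjacent-duplicate scan over the sorted list with a prev accumulator, replacing A's fused early-return loop with a hash set.
import Mathlib
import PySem

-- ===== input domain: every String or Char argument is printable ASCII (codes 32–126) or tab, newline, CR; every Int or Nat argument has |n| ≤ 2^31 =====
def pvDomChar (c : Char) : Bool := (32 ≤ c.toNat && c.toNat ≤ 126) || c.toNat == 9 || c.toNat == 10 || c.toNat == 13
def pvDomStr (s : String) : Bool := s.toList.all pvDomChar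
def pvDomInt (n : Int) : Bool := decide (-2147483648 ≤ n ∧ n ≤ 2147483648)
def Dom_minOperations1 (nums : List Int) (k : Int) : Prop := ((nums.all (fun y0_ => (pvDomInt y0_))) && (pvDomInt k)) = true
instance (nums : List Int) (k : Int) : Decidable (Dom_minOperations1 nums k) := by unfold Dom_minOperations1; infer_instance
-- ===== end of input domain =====

-- B sorts first, rejects via the sorted minimum, and counts distinct values above k by an
-- adjacent-duplicate scan with a prev accumulator (alternative algorithm; A uses a fused hash-set loop).


-- ===== PORT A =====
-- A's loop: early return -1 on x < k, add x to the set on x > k, else skip.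
def minOperations1Loop (k : Int) : List Int → PySem.Set Int → Int
  | [], st => (st.length : Int)
  | x :: xs, st =>
    if x < k then -1
    else if x > k then minOperations1Loop k xs (PySem.Set.add st x)
    else minOperations1Loop k xs st

def minOperations1 (nums : List Int) (k : Int) : Int :=
  minOperations1Loop k nums PySem.Set.empty

-- ===== PORT B =====
-- B's scan: 'for x in s: if x > k and x != prev: count += 1; prev = x'
def altScan (k : Int) : List Int → Option Int → Int → Int
  | [], _, count => count
  | x :: xs, prev, count =>
    altScan k xs (some x) (if x > k ∧ some x ≠ prev then count + 1 else count)

def minOperations1_alt (nums : List Int) (k : Int) : Int :=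
  let s := PySem.List.sorted nums (fun x => x) false
  -- 'if s and s[0] < k: return -1'
  if s.head?.any (fun h => decide (h < k)) then -1
  else altScan k s none 0

-- ===== PRECONDITION & SPEC =====
def Spec_minOperations1 (nums : List Int) (k : Int) (out : Int) : Prop := out = minOperations1_alt nums k
instance (nums : List Int) (k : Int) (out : Int) : Decidable (Spec_minOperations1 nums k out) := by unfold Spec_minOperations1; infer_instance

-- ===== CLAIM (what is proved, stated in full; the proofs are below) =====
def Claim_equal_minOperations1 : Prop := ∀ (nums : List Int) (k : Int), Dom_minOperations1 nums k → Spec_minOperations1 nums k (minOperations1 nums k)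

-- ===== LEMMAS AND PROOFS =====
-- A's loop yields -1 if some element is below k, else the size of st updated with elements above k.
theorem minOperations1Loop_eq (k : Int) (xs : List Int) : ∀ st : PySem.Set Int,
    minOperations1Loop k xs st =
      if xs.any (fun x => x < k) then -1
      else ((PySem.Set.update st (xs.filter (fun x => x > k))).length : Int) := by
  induction xs with
  | nil => intro st; simp [minOperations1Loop, PySem.Set.update]
  | cons x xs ih =>
    intro st
    by_cases h1 : x < k
    · simp [minOperations1Loop, h1]
    · by_cases h2 : x > k
      · simp [minOperations1Loop, h1, h2, ih, PySem.Set.update]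
      · simp [minOperations1Loop, h1, h2, ih, PySem.Set.update]

theorem altScan_add (k : Int) (xs : List Int) : ∀ prev c,
    altScan k xs prev c = c + altScan k xs prev 0 := by
  induction xs with
  | nil => intro prev c; simp [altScan]
  | cons x xs ih =>
    intro prev c
    simp only [altScan]
    rw [ih, ih (some x) (if x > k ∧ some x ≠ prev then 0 + 1 else 0)]
    split_ifs <;> omega

theorem discard_eq_filter (l : List Int) (x : Int) :
    PySem.Set.discard l x = l.filter (fun y => some y ≠ some x) := by
  simp only [PySem.Set.discard]
  apply List.filter_congr
  intro y _
  cases h : decide (y = x) <;> simp_all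

theorem altScan_sorted (k : Int) (xs : List Int) :
    ∀ prev : Option Int, xs.Pairwise (· ≤ ·) → (∀ p, prev = some p → ∀ y ∈ xs, p ≤ y) →
    altScan k xs prev 0 =
      (((PySem.Set.ofList (xs.filter (fun x => x > k))).filter (fun y => some y ≠ prev)).length : Int) := by
  induction xs with
  | nil => intro prev _ _; simp [altScan, PySem.Set.ofList]
  | cons x xs ih =>
    intro prev hp hlb
    have hx_le : ∀ y ∈ xs, x ≤ y := fun y hy => (List.pairwise_cons.mp hp).1 y hy
    have htail := ih (some x) (List.pairwise_cons.mp hp).2 (by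
      intro p hp' y hy; cases hp'; exact hx_le y hy)
    have hmemS : ∀ y ∈ PySem.Set.ofList (xs.filter (fun x => x > k)), x ≤ y ∧ k < y := by
      intro y hy
      have h' := (PySem.Set.mem_ofList _ _).mp hy
      have h1 := (List.mem_filter.mp h').1
      have h2 := (List.mem_filter.mp h').2
      exact ⟨hx_le y h1, by simpa using h2⟩
    simp only [altScan]
    rw [altScan_add, htail]
    by_cases h2 : x > k
    · rw [List.filter_cons_of_pos (by simpa using h2), PySem.Set.ofList_cons,
        discard_eq_filter]
      by_cases h3 : some x ≠ prev
      · rw [if_pos ⟨h2, h3⟩, List.filter_cons_of_pos (by simpa using h3),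
          List.filter_filter]
        have heq : (PySem.Set.ofList (xs.filter (fun x => x > k))).filter
              (fun y => decide (some y ≠ prev) && decide (some y ≠ some x))
            = (PySem.Set.ofList (xs.filter (fun x => x > k))).filter
              (fun y => some y ≠ some x) := by
          apply List.filter_congr
          intro y hy
          have hyx := (hmemS y hy).1
          have hyprev : some y ≠ prev := by
            rcases prev with _ | p
            · simp
            · have hpx : p ≤ x := hlb p rfl x (by simp)
              simp only [ne_eq, Option.some.injEq]
              intro hyp
              have hxy : x = y := le_antisymm hyx (hyp ▸ hpx)
              exact h3 (by simp [hxy, hyp])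
          simp [hyprev]
        rw [heq, List.length_cons]
        push_cast
        omega
      · rw [not_ne_iff] at h3
        rw [if_neg (by simp [h3]), ← h3, List.filter_cons_of_neg (by simp),
          List.filter_filter]
        have hfun : (fun (a : Int) => decide (some a ≠ some x) && decide (some a ≠ some x))
            = fun (a : Int) => decide (some a ≠ some x) := by
          funext a; exact Bool.and_self _
        rw [hfun]
        omega
    · rw [List.filter_cons_of_neg (by simpa using h2), if_neg (by simp [h2])]
      have hall : ∀ (q : Option Int), (∀ p, q = some p → p ≤ k) →
          ((PySem.Set.ofList (xs.filter (fun x => x > k))).filter (fun y => some y ≠ q))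
          = (PySem.Set.ofList (xs.filter (fun x => x > k))) := by
        intro q hq
        apply List.filter_eq_self.mpr
        intro y hy
        rcases q with _ | p
        · simp
        · have hpk : p ≤ k := hq p rfl
          have := (hmemS y hy).2
          simp only [ne_eq, Option.some.injEq, decide_eq_true_eq]
          omega
      have hxk : x ≤ k := by omega
      rw [hall (some x) (by intro p hp'; cases hp'; exact hxk)]
      rcases prev with _ | p
      · rw [hall none (by simp)]; omega
      · have hpk : p ≤ k := le_trans (hlb p rfl x (by simp)) hxk
        rw [hall (some p) (by intro q hq; cases hq; exact hpk)]; omega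

-- two lists with the same elements produce equal-size sets
theorem ofList_length_of_perm (l1 l2 : List Int) (h : l1.Perm l2) :
    (PySem.Set.ofList l1).length = (PySem.Set.ofList l2).length := by
  have hperm : (PySem.Set.ofList l1).Perm (PySem.Set.ofList l2) := by
    rw [List.perm_ext_iff_of_nodup (PySem.Set.nodup_ofList l1) (PySem.Set.nodup_ofList l2)]
    intro a
    simp only [PySem.Set.mem_ofList]
    exact ⟨fun ha => h.mem_iff.mp ha, fun ha => h.mem_iff.mpr ha⟩
  exact hperm.length_eq

-- ===== VERDICT (by name: the statement is the Claim_ definition above) =====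
theorem minOperations1_spec : Claim_equal_minOperations1 := by
  intro nums k _
  unfold Spec_minOperations1 minOperations1 minOperations1_alt
  rw [minOperations1Loop_eq]
  set s := PySem.List.sorted nums (fun x => x) false with hs
  have hperm : s.Perm nums := PySem.List.sorted_perm nums (fun x => x) false
  have hpw : s.Pairwise (· ≤ ·) := by
    simpa using PySem.List.sorted_pairwise nums (fun x => x)
  have hany : nums.any (fun x => decide (x < k)) = s.head?.any (fun h => decide (h < k)) := by
    cases hsc : s with
    | nil =>
      have hn : nums = [] := by
        have h0 := hperm; rw [hsc] at h0; exact h0.symm.eq_nil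
      simp [hn]
    | cons m t =>
      have hm : ∀ y ∈ nums, m ≤ y := by
        intro y hy
        have := PySem.List.key_head_sorted_le (xs := nums) (key := fun x => x) (by rw [← hs, hsc])
        exact this y hy
      by_cases hmk : m < k
      · have hmem : m ∈ nums := hperm.mem_iff.mp (by simp [hsc])
        have : nums.any (fun x => decide (x < k)) = true :=
          List.any_eq_true.mpr ⟨m, hmem, by simpa using hmk⟩
        simp [this, hmk]
      · have : nums.any (fun x => decide (x < k)) = false := by
          apply List.any_eq_false.mpr
          intro y hy
          have := hm y hy
          simp only [decide_eq_true_eq]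
          omega
        simp [this, hmk]
  rw [hany]
  by_cases hh : s.head?.any (fun h => decide (h < k)) = true
  · simp [hh]
  · rw [Bool.not_eq_true] at hh
    simp only [hh, Bool.false_eq_true, if_false]
    rw [altScan_sorted k s none hpw (by simp)]
    have hfperm : (s.filter (fun x => x > k)).Perm (nums.filter (fun x => x > k)) :=
      hperm.filter _
    have hnone : ((PySem.Set.ofList (s.filter (fun x => x > k))).filter
        (fun y => some y ≠ (none : Option Int))) = PySem.Set.ofList (s.filter (fun x => x > k)) := by
      apply List.filter_eq_self.mpr; intro y _; simp
    rw [hnone, ofList_length_of_perm _ _ hfperm]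
    simp [PySem.Set.update_nil_left]
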